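-- pv_equiv track=rewrite | github.com/zihyulin0/Auto-Force-Field-Fitting | old_code/FF_functions/frag_gen_inter.py | gen_perms
-- ===== SOURCE A (Python) =====
-- from itertools import permutations
--
-- def gen_perms(types,start=0):
--     ind = [ count_i for count_i,i in enumerate(types) if i==types[0] ]
--     not_ind = [ count_i for count_i,i in enumerate(types) if i !=types[0] ]
--     for i in permutations(range(start,start+len(ind)),len(ind)):
--         if len(not_ind) > 0:
--             for j in gen_perms([ types[j] for j in not_ind ],start=len(ind)+start):
--                 yield i+j
--         else:
--             yield i
-- ===== SOURCE B (Python) =====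
-- from itertools import permutations, product
--
-- def gen_perms(types, start=0):
--     # group sizes in first-appearance order, via == (no hashing)
--     groups = []  # list of [representative, size]
--     for t in types:
--         for g in groups:
--             if g[0] == t:
--                 g[1] += 1
--                 break
--         else:
--             groups.append([t, 1])
--     # one concrete permutation block per group, consecutive index ranges
--     blocks = []
--     s = start
--     for _, size in groups:
--         blocks.append(list(permutations(range(s, s + size), size)))
--         s += size
--     for combo in product(*blocks):
--         yield sum(combo, ())
-- ===== Notes on version B (the rewrite author's own statement) =====
-- stated objective: alternative
-- what changed: A recursively nests generators (permute the first ==-group, recurse on the remaining types); B instead precomputes all (representative, size) groups in one first-appearance scan, builds one concrete permutation block per group over consecutive index ranges, and yields the concatenations of itertools.product over the blocks.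
import Mathlib
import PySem

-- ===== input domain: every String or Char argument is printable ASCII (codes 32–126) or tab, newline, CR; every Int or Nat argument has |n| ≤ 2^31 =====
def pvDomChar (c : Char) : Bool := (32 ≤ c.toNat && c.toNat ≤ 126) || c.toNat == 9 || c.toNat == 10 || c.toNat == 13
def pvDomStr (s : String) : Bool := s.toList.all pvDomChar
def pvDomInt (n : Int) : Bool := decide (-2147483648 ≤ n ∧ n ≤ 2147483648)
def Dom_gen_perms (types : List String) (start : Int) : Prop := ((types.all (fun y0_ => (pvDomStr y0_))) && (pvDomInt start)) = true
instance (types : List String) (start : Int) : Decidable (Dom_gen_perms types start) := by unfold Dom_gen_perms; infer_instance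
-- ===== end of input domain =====

-- B replaces A's recursive generator nesting by: group sizes in first-appearance order,
-- one permutation block per group, then an itertools.product over the blocks (alternative
-- decomposition, same cost; return-value equivalence, both are generators in Python).

-- itertools.permutations(pool, len(pool)) in itertools' (lexicographic-by-position) order:
-- all ways to pick the head from the pool in order, then recurse on the rest.
def pySelections : List Int → List (Int × List Int)
  | [] => []
  | x :: xs => (x, xs) :: (pySelections xs).map (fun p => (p.1, x :: p.2))

def pyPermsAux : Nat → List Int → List (List Int)
  | 0, _ => [[]]
  | n + 1, l => (pySelections l).flatMap (fun p => (pyPermsAux n p.2).map (p.1 :: ·))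

def pyPerms (l : List Int) : List (List Int) := pyPermsAux l.length l

-- ===== PORT A =====
-- fuel = recursion depth bound (types.length + 1); a pure totality device
def gen_permsF : Nat → List String → Int → List (List Int)
  | 0, _, _ => []
  | fuel + 1, types, start =>
    let t0 := PySem.List.pyGetD types 0 ""   -- types[0]; only compared against when types ≠ []
    let ind := ((PySem.List.enumerate types 0).filter (fun p => p.2 == t0)).map (·.1)
    let not_ind := ((PySem.List.enumerate types 0).filter (fun p => !(p.2 == t0))).map (·.1)
    (pyPerms (PySem.List.pyRange start (start + ind.length) 1)).flatMap (fun i =>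
      if not_ind.length > 0 then
        (gen_permsF fuel (not_ind.filterMap (fun j => PySem.List.pyGet? types j))
            ((ind.length : Int) + start)).map (fun j => i ++ j)
      else [i])

def gen_perms (types : List String) (start : Int) : List (List Int) :=
  gen_permsF (types.length + 1) types start

-- ===== PORT B =====
-- groups: list of (representative, size) in first-appearance order, == based
def insertGroup : List (String × Nat) → String → List (String × Nat)
  | [], t => [(t, 1)]
  | g :: gs, t => if g.1 == t then (g.1, g.2 + 1) :: gs else g :: insertGroup gs t

def computeGroups (types : List String) : List (String × Nat) :=
  types.foldl insertGroup []

-- one permutation block per group over consecutive index ranges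
def mkBlocks : List (String × Nat) → Int → List (List (List Int))
  | [], _ => []
  | g :: gs, s => pyPerms (PySem.List.pyRange s (s + g.2) 1) :: mkBlocks gs (s + g.2)

-- itertools.product (first factor slowest)
def listProd : List (List (List Int)) → List (List (List Int))
  | [] => [[]]
  | b :: bs => b.flatMap (fun x => (listProd bs).map (x :: ·))

def gen_perms_alt (types : List String) (start : Int) : List (List Int) :=
  (listProd (mkBlocks (computeGroups types) start)).map (fun c => c.flatten)

-- ===== PRECONDITION & SPEC =====
def Spec_gen_perms (types : List String) (start : Int) (out : List (List Int)) : Prop := out = gen_perms_alt types start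
instance (types : List String) (start : Int) (out : List (List Int)) : Decidable (Spec_gen_perms types start out) := by unfold Spec_gen_perms; infer_instance

-- ===== CLAIM (what is proved, stated in full; the proofs are below) =====
def Claim_equal_gen_perms : Prop := ∀ (types : List String) (start : Int), Dom_gen_perms types start → Spec_gen_perms types start (gen_perms types start)

-- ===== LEMMAS AND PROOFS =====

theorem insertGroup_of_not_mem (acc : List (String × Nat)) (t : String)
    (h : ∀ g ∈ acc, g.1 ≠ t) : insertGroup acc t = acc ++ [(t, 1)] := by
  induction acc with
  | nil => rfl
  | cons g gs ih =>
    have hg : g.1 ≠ t := h g (by simp)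
    simp only [insertGroup, beq_iff_eq, if_neg hg, List.cons_append]
    rw [ih (fun g' hg' => h g' (by simp [hg']))]

theorem insertGroup_of_mem (acc : List (String × Nat)) (t : String)
    (hnd : (acc.map (·.1)).Nodup) (h : t ∈ acc.map (·.1)) :
    insertGroup acc t = acc.map (fun g => if g.1 = t then (g.1, g.2 + 1) else g) := by
  induction acc with
  | nil => simp at h
  | cons g gs ih =>
    by_cases hg : g.1 = t
    · simp only [insertGroup, beq_iff_eq, if_pos hg, List.map_cons, if_pos hg]
      have hgs : ∀ g' ∈ gs, ¬ (g'.1 = t) := by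
        intro g' hg' he
        simp only [List.map_cons, List.nodup_cons] at hnd
        exact hnd.1 (by rw [hg, ← he]; exact List.mem_map_of_mem hg')
      rw [List.map_congr_left (fun g' hg' => by rw [if_neg (hgs g' hg')]), List.map_id']
    · simp only [insertGroup, beq_iff_eq, if_neg hg, List.map_cons, if_neg hg]
      simp only [List.map_cons, List.nodup_cons] at hnd
      simp only [List.map_cons, List.mem_cons] at h
      rcases h with h | h
      · exact absurd h.symm hg
      · rw [ih hnd.2 h]

theorem foldl_insertGroup : ∀ (n : Nat) (l : List String), l.length ≤ n →
    ∀ (acc : List (String × Nat)), (acc.map (·.1)).Nodup →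
    l.foldl insertGroup acc =
      acc.map (fun g => (g.1, g.2 + (l.filter (fun y => y == g.1)).length))
      ++ (l.filter (fun y => !(acc.any (fun g => g.1 == y)))).foldl insertGroup [] := by
  intro n
  induction n with
  | zero =>
    intro l hl acc hnd
    have hnil : l = [] := List.eq_nil_of_length_eq_zero (Nat.le_zero.mp hl)
    subst hnil; simp
  | succ m ih =>
    intro l hl acc hnd
    cases l with
    | nil => simp
    | cons x l =>
      rw [List.foldl_cons]
      by_cases hx : acc.any (fun g => g.1 == x)
      · -- x matches an existing representative
        have hxm : x ∈ acc.map (·.1) := by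
          simp only [List.any_eq_true, beq_iff_eq] at hx
          obtain ⟨g, hg, hgx⟩ := hx
          exact List.mem_map.mpr ⟨g, hg, hgx⟩
        rw [insertGroup_of_mem acc x hnd hxm]
        have hfst : ((acc.map (fun g => if g.1 = x then (g.1, g.2 + 1) else g)).map (·.1))
            = acc.map (·.1) := by
          rw [List.map_map]
          exact List.map_congr_left (fun g _ => by by_cases h : g.1 = x <;> simp [h])
        rw [ih l (by simpa using Nat.le_of_succ_le_succ hl) _ (hfst ▸ hnd)]
        congr 1
        · -- map parts agree
          rw [List.map_map]
          refine List.map_congr_left (fun g hg => ?_)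
          by_cases h : g.1 = x
          · have hxg : (x == g.1) = true := by simp [h]
            simp only [Function.comp, if_pos h, List.filter_cons, hxg, if_pos, List.length_cons]
            simp; omega
          · have hxg : (x == g.1) = false := by
              simp only [beq_eq_false_iff_ne]; exact fun he => h he.symm
            simp only [Function.comp, if_neg h, List.filter_cons, hxg]
            simp
        · -- filter parts agree
          rw [List.filter_cons]
          simp only [hx, Bool.not_true, Bool.false_eq_true, if_false]
          congr 1
          refine List.filter_congr (fun y _ => ?_)
          congr 1
          rw [List.any_map]
          exact List.any_congr rfl (fun (g : String × Nat) => by by_cases h : g.1 = x <;> simp [Function.comp, h])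
      · -- x is a new representative
        have hne : ∀ g ∈ acc, g.1 ≠ x := by
          simp only [List.any_eq_true, beq_iff_eq] at hx
          push_neg at hx
          exact hx
        rw [insertGroup_of_not_mem acc x hne]
        have hxnm : x ∉ acc.map (fun g : String × Nat => g.1) := by
          simp only [List.mem_map]
          rintro ⟨g, hg, hgx⟩
          exact hne g hg hgx
        have hnd' : (((acc ++ [((x, 1) : String × Nat)]).map (·.1)).Nodup) := by
          simp only [List.map_append, List.map_cons, List.map_nil]
          exact List.Nodup.append hnd (List.nodup_singleton x)
            (by simpa [List.disjoint_singleton] using hxnm)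
        rw [ih l (by simpa using Nat.le_of_succ_le_succ hl) _ hnd']
        -- RHS: pull x through the filter and fold it in
        have hPx : (!(acc.any (fun g => g.1 == x))) = true := by simp [hx]
        conv_rhs => rw [List.filter_cons, if_pos hPx, List.foldl_cons]
        have hstep : insertGroup [] x = [(x, 1)] := rfl
        rw [hstep]
        rw [ih (l.filter (fun y => !(acc.any (fun g => g.1 == y))))
            (le_trans (List.length_filter_le _ _) (by simpa using Nat.le_of_succ_le_succ hl))
            [(x, 1)] (by simp)]
        -- now both sides are explicit pieces; match them
        rw [List.map_append]
        simp only [List.map_cons, List.map_nil, List.append_assoc]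
        congr 1
        · -- old groups: counts in l vs counts in x :: l
          refine List.map_congr_left (fun g hg => ?_)
          have hxg : (x == g.1) = false := by
            simp only [beq_eq_false_iff_ne]
            exact fun he => hne g hg he.symm
          rw [List.filter_cons]
          simp [hxg]
        congr 1
        · -- the new group's count
          have hcnt : ((l.filter (fun y => !(acc.any (fun g => g.1 == y)))).filter
              (fun y => y == x)) = l.filter (fun y => y == x) := by
            rw [List.filter_filter]
            refine List.filter_congr (fun y _ => ?_)
            by_cases h : y = x
            · subst h
              simp [hx]
            · simp [h]
          rw [hcnt]
        · -- the residual fold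
          congr 1
          rw [List.filter_filter]
          refine List.filter_congr (fun y _ => ?_)
          simp only [List.any_append, List.any_cons, List.any_nil, Bool.or_false,
            Bool.not_or]
          rw [Bool.and_comm]

theorem groups_cons (t : String) (rest : List String) :
    computeGroups (t :: rest) =
      (t, 1 + (rest.filter (fun y => y == t)).length)
        :: computeGroups (rest.filter (fun y => !(y == t))) := by
  show (t :: rest).foldl insertGroup [] = _
  rw [List.foldl_cons]
  have hstep : insertGroup [] t = [(t, 1)] := rfl
  rw [hstep, foldl_insertGroup rest.length rest le_rfl [(t, 1)] (by simp)]
  simp only [List.map_cons, List.map_nil, List.any_cons, List.any_nil, Bool.or_false,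
    List.cons_append, List.nil_append]
  rw [show (fun y => !(t == y)) = (fun y : String => !(y == t)) from
    funext fun y => by rw [BEq.comm]]
  rfl

-- enumerate bridges: values of the filtered enumeration / retrieval by the filtered indices
theorem enum_filter_snd (q : String → Bool) : ∀ (xs : List String) (s : Int),
    ((PySem.List.enumerate xs s).filter (fun p => q p.2)).map (·.2) = xs.filter q := by
  intro xs
  induction xs with
  | nil => intro s; simp [PySem.List.enumerate_nil]
  | cons x xs ih =>
    intro s
    rw [PySem.List.enumerate_cons, List.filter_cons, List.filter_cons]
    by_cases h : q x <;> simp [h, ih]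

theorem ind_len (q : String → Bool) (xs : List String) :
    ((((PySem.List.enumerate xs 0).filter (fun p => q p.2)).map (·.1)).length)
      = (xs.filter q).length := by
  rw [List.length_map, ← enum_filter_snd q xs 0, List.length_map]

theorem sub_eq (q : String → Bool) (xs : List String) :
    ((((PySem.List.enumerate xs 0).filter (fun p => q p.2)).map (·.1)).filterMap
        (fun j => PySem.List.pyGet? xs j)) = xs.filter q := by
  rw [List.filterMap_map]
  have h1 : ((PySem.List.enumerate xs 0).filter (fun p => q p.2)).filterMap
      ((fun j => PySem.List.pyGet? xs j) ∘ (·.1))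
      = ((PySem.List.enumerate xs 0).filter (fun p => q p.2)).filterMap
      (fun p => some p.2) := by
    refine List.filterMap_congr (fun p hp => ?_)
    have hpm : p ∈ PySem.List.enumerate xs 0 := List.mem_of_mem_filter hp
    rw [PySem.List.mem_enumerate_iff] at hpm
    obtain ⟨k, hk, rfl⟩ := hpm
    simp [PySem.List.pyGet?_natCast, List.getElem?_eq_getElem hk]
  rw [h1]
  have h2 : ((PySem.List.enumerate xs 0).filter (fun p => q p.2)).filterMap
      (fun p => some p.2)
      = ((PySem.List.enumerate xs 0).filter (fun p => q p.2)).map (·.2) := by simp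
  rw [h2]
  exact enum_filter_snd q xs 0

-- decomposing B along the first block
theorem alt_cons (b : List (List Int)) (bs : List (List (List Int))) :
    (listProd (b :: bs)).map (fun c => c.flatten)
      = b.flatMap (fun x => ((listProd bs).map (fun c => c.flatten)).map (x ++ ·)) := by
  simp only [listProd, List.map_flatMap, List.map_map]
  rfl

theorem main_lemma : ∀ (fuel : Nat) (types : List String) (start : Int),
    types.length < fuel → gen_permsF fuel types start = gen_perms_alt types start := by
  intro fuel
  induction fuel with
  | zero => intro types start h; omega
  | succ m ih =>
    intro types start h
    cases types with
    | nil =>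
      show gen_permsF (m + 1) [] start = _
      simp [gen_permsF, gen_perms_alt, computeGroups, mkBlocks, listProd,
        PySem.List.enumerate_nil, pyPerms, pyPermsAux, PySem.List.pyRange_zero]
    | cons t rest =>
      have ht0 : PySem.List.pyGetD (t :: rest) 0 "" = t := PySem.List.pyGetD_zero_cons ..
      simp only [gen_permsF, ht0]
      rw [ind_len (fun y => y == t) (t :: rest), ind_len (fun y => !(y == t)) (t :: rest),
        sub_eq (fun y => !(y == t)) (t :: rest)]
      have hfe : (t :: rest).filter (fun y => y == t) = t :: rest.filter (fun y => y == t) := by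
        simp [List.filter_cons]
      have hfn : (t :: rest).filter (fun y => !(y == t)) = rest.filter (fun y => !(y == t)) := by
        simp [List.filter_cons]
      rw [hfe, hfn]
      -- B side
      conv_rhs => rw [gen_perms_alt, groups_cons, mkBlocks, alt_cons]
      by_cases hs : (rest.filter (fun y => !(y == t))) = []
      · rw [hs]
        simp only [List.length_nil, Nat.lt_irrefl, if_false, List.length_cons]
        show _ = _
        simp only [computeGroups, List.foldl_nil, mkBlocks, listProd, List.flatMap_nil,
          List.map_nil]
        simp [Nat.add_comm]
      · have hpos : 0 < (rest.filter (fun y => !(y == t))).length :=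
          List.length_pos_of_ne_nil hs
        simp only [List.length_cons, hpos, if_pos]
        have hlt : (rest.filter (fun y => !(y == t))).length < m := by
          have h1 : (rest.filter (fun y => !(y == t))).length ≤ rest.length :=
            List.length_filter_le _ _
          have h2 : rest.length < m := by
            simp only [List.length_cons] at h
            omega
          omega
        rw [ih _ _ hlt]
        have e1 : ((1 : Nat) + (rest.filter (fun y => y == t)).length)
            = ((rest.filter (fun y => y == t)).length + 1) := by omega
        rw [e1, Int.add_comm start ((((rest.filter (fun y => y == t)).length + 1 : Nat) : Int))]
        rfl

-- ===== VERDICT (by name: the statement is the Claim_ definition above) =====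
theorem gen_perms_spec : Claim_equal_gen_perms := by
  intro types start _
  show gen_perms types start = gen_perms_alt types start
  exact main_lemma _ _ _ (Nat.lt_succ_self _)
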